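-- pv_equiv track=rewrite | github.com/gaeunpark924/PS-practice | 브루트포스알고리즘/한수_분해합_블랙잭.py | solution
-- ===== SOURCE A (Python) =====
-- def solution(n):
--     #분해합
--     result = 0
--     for i in range(1,n):            #n//2 부터 해도 됨. 시간 단축
--         new_i = i
--         decom_sum = i
--         while new_i > 0:
--             decom_sum += new_i%10
--             new_i = new_i//10
--         if decom_sum == n:
--             result = i
--             break
--     return result
-- ===== SOURCE B (Python) =====
-- def _dsum(i):
--     return 0 if i <= 0 else i % 10 + _dsum(i // 10)
--
-- def solution(n):
--     # scan only the window [n - 9*numdigits(n), n): any smaller i has i + digitsum(i) < n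
--     span, t = 0, n
--     while t > 0:
--         span += 9
--         t //= 10
--     for i in range(max(1, n - span), n):
--         if i + _dsum(i) == n:
--             return i
--     return 0
-- ===== Notes on version B (the rewrite author's own statement) =====
-- stated objective: faster
-- what changed: Instead of scanning every candidate from 1, B computes 9*numdigits(n) and scans only the bounded window [n - 9*numdigits(n), n), since any smaller i has i + digitsum(i) < n.
import Mathlib
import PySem

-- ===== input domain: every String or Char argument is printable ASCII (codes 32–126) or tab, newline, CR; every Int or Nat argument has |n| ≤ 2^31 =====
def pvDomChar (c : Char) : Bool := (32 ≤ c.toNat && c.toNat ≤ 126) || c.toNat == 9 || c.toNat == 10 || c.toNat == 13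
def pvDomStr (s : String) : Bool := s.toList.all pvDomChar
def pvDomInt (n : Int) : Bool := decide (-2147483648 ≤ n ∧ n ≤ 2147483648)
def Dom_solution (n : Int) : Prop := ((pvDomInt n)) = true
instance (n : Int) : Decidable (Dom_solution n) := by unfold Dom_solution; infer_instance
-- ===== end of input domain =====

-- B changes the scan from all of [1, n) to the bounded window [n - 9*numdigits(n), n); faster (asymptotic).

-- ===== PORT A =====
-- the inner 'while new_i > 0' loop, carrying decom_sum
def solutionWhile (new_i decom : Int) : Int :=
  if h : 0 < new_i then
    solutionWhile (PySem.Int.floordiv new_i 10) (decom + PySem.Int.mod new_i 10)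
  else decom
termination_by new_i.toNat
decreasing_by
  rw [PySem.Int.floordiv_eq_ediv_of_pos (by norm_num : (0:Int) < 10)]
  omega

-- the 'for i in range(1, n)' loop with its break (result stays 0 if no break)
def solutionGo (n : Int) : List Int → Int
  | [] => 0
  | i :: rest => if solutionWhile i i = n then i else solutionGo n rest

def solution (n : Int) : Int := solutionGo n (PySem.List.pyRange 1 n 1)

-- ===== PORT B =====
def dsumAlt (i : Int) : Int :=
  if h : i ≤ 0 then 0
  else PySem.Int.mod i 10 + dsumAlt (PySem.Int.floordiv i 10)
termination_by i.toNat
decreasing_by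
  rw [PySem.Int.floordiv_eq_ediv_of_pos (by norm_num : (0:Int) < 10)]
  omega

-- 'while t > 0: span += 9; t //= 10'
def spanLoop (span t : Int) : Int :=
  if h : 0 < t then spanLoop (span + 9) (PySem.Int.floordiv t 10) else span
termination_by t.toNat
decreasing_by
  rw [PySem.Int.floordiv_eq_ediv_of_pos (by norm_num : (0:Int) < 10)]
  omega

def solutionAltGo (n : Int) : List Int → Int
  | [] => 0
  | i :: rest => if i + dsumAlt i = n then i else solutionAltGo n rest

def solution_alt (n : Int) : Int :=
  solutionAltGo n (PySem.List.pyRange (max 1 (n - spanLoop 0 n)) n 1)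

-- ===== PRECONDITION & SPEC =====
def Spec_solution (n : Int) (out : Int) : Prop := out = solution_alt n
instance (n : Int) (out : Int) : Decidable (Spec_solution n out) := by unfold Spec_solution; infer_instance

-- ===== CLAIM (what is proved, stated in full; the proofs are below) =====
def Claim_equal_solution : Prop := ∀ (n : Int), Dom_solution n → Spec_solution n (solution n)

-- ===== LEMMAS AND PROOFS =====

theorem while_eq_dsum (m acc : Int) : solutionWhile m acc = acc + dsumAlt m := by
  by_cases h : 0 < m
  · rw [solutionWhile, dif_pos h, while_eq_dsum]
    conv_rhs => rw [dsumAlt, dif_neg (show ¬ m ≤ 0 by omega)]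
    ring
  · rw [solutionWhile, dif_neg h]
    conv_rhs => rw [dsumAlt, dif_pos (show m ≤ 0 by omega)]
    ring
termination_by m.toNat
decreasing_by
  rw [PySem.Int.floordiv_eq_ediv_of_pos (by norm_num : (0:Int) < 10)]
  omega

theorem spanLoop_add (s t : Int) : spanLoop s t = s + spanLoop 0 t := by
  by_cases h : 0 < t
  · conv_lhs => rw [spanLoop, dif_pos h]
    conv_rhs => rw [spanLoop, dif_pos h]
    rw [spanLoop_add (s + 9), spanLoop_add (0 + 9)]
    ring
  · conv_lhs => rw [spanLoop, dif_neg h]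
    conv_rhs => rw [spanLoop, dif_neg h]
    ring
termination_by t.toNat
decreasing_by
  all_goals rw [PySem.Int.floordiv_eq_ediv_of_pos (by norm_num : (0:Int) < 10)]
  all_goals omega

theorem spanLoop_nonneg (t : Int) : 0 ≤ spanLoop 0 t := by
  by_cases h : 0 < t
  · rw [spanLoop, dif_pos h, spanLoop_add]
    have := spanLoop_nonneg (PySem.Int.floordiv t 10)
    linarith
  · rw [spanLoop, dif_neg h]
termination_by t.toNat
decreasing_by
  rw [PySem.Int.floordiv_eq_ediv_of_pos (by norm_num : (0:Int) < 10)]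
  omega

theorem dsum_le_span (i t : Int) (hit : i ≤ t) : dsumAlt i ≤ spanLoop 0 t := by
  by_cases h : i ≤ 0
  · rw [dsumAlt, dif_pos h]
    exact spanLoop_nonneg t
  · have ht : 0 < t := by omega
    rw [dsumAlt, dif_neg h, spanLoop, dif_pos ht, spanLoop_add]
    have hdiv : PySem.Int.floordiv i 10 ≤ PySem.Int.floordiv t 10 := by
      rw [PySem.Int.floordiv_eq_ediv_of_pos (by norm_num : (0:Int) < 10),
          PySem.Int.floordiv_eq_ediv_of_pos (by norm_num : (0:Int) < 10)]
      omega
    have hrec := dsum_le_span (PySem.Int.floordiv i 10) (PySem.Int.floordiv t 10) hdiv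
    have hmod : PySem.Int.mod i 10 ≤ 9 := by
      rw [PySem.Int.mod_eq_emod_of_pos (by norm_num : (0:Int) < 10)]
      omega
    linarith
termination_by i.toNat
decreasing_by
  rw [PySem.Int.floordiv_eq_ediv_of_pos (by norm_num : (0:Int) < 10)]
  omega

theorem go_eq_altGo (n : Int) (l : List Int) : solutionGo n l = solutionAltGo n l := by
  induction l with
  | nil => rfl
  | cons i rest ih =>
      rw [solutionGo, solutionAltGo, while_eq_dsum, ih]

theorem altGo_append (n : Int) (l1 l2 : List Int)
    (hfail : ∀ i ∈ l1, i + dsumAlt i ≠ n) :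
    solutionAltGo n (l1 ++ l2) = solutionAltGo n l2 := by
  induction l1 with
  | nil => rfl
  | cons i rest ih =>
      rw [List.cons_append, solutionAltGo]
      rw [if_neg (hfail i (by simp))]
      exact ih (fun j hj => hfail j (by simp [hj]))

theorem solution_eq_alt (n : Int) : solution n = solution_alt n := by
  unfold solution solution_alt
  rw [go_eq_altGo]
  by_cases hn : n ≤ 1
  · rw [PySem.List.pyRange_one_eq_nil (by omega : (n:Int) ≤ 1),
        PySem.List.pyRange_one_eq_nil (le_max_left 1 (n - spanLoop 0 n) |>.trans' (by omega : n ≤ 1))]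
  · have hspan := spanLoop_nonneg n
    have h1 : (1:Int) ≤ max 1 (n - spanLoop 0 n) := le_max_left _ _
    have h2 : max 1 (n - spanLoop 0 n) ≤ n := max_le (by omega) (by linarith)
    rw [PySem.List.pyRange_one_append 1 (max 1 (n - spanLoop 0 n)) n h1 h2]
    apply altGo_append
    intro i hi
    obtain ⟨hi1, hi2⟩ := PySem.List.mem_pyRange_one.mp hi
    rcases lt_max_iff.mp hi2 with hlt | hlt
    · omega
    · have hds : dsumAlt i ≤ spanLoop 0 n := dsum_le_span i n (by linarith)
      intro hcontra
      linarith

-- ===== VERDICT (by name: the statement is the Claim_ definition above) =====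
theorem solution_spec : Claim_equal_solution := by
  intro n _
  unfold Spec_solution
  exact solution_eq_alt n
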